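-- pv_equiv track=rewrite | github.com/szu-advtech/AdvTech | 2022/7-黄进科 指导老师-廖好/utils.py | jema
-- ===== SOURCE A (Python) =====
-- def jema(M): #Joint entropy minimization algorithm which is equivalent to Minimal Entropy Coupling
--     # M = transpose(M)
--     e = []
--     r = 1e9+10
--     for i in range(0, len(M)):
--         M[i].sort(reverse=True) #decreased
--         r = min(r, M[i][0])
--     while r > 0:
--         e.append(r)
--         for i in range(0, len(M)):
--             M[i][0] -= r
--             M[i].sort(reverse=True)
--         r = 1e9+10
--         for i in range(0, len(M)):
--             r = min(r, M[i][0])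
--     return e
-- ===== SOURCE B (Python) =====
-- # Re-implementation: keep each row as a descending sorted list; per step, pop the
-- # head, subtract r, and re-insert it at the position found by binary search --
-- # no per-iteration full sort.  Return-value equivalence only: A sorts/modifies
-- # the rows of M in place, B leaves M untouched.
-- def jema(M):
--     rows = [sorted(row, reverse=True) for row in M]
--     e = []
--     while rows:
--         r = min(row[0] for row in rows)
--         if r <= 0:
--             break
--         e.append(r)
--         for row in rows:
--             v = row.pop(0) - r
--             lo, hi = 0, len(row)
--             while lo < hi:
--                 mid = (lo + hi) // 2
--                 if row[mid] >= v:
--                     lo = mid + 1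
--                 else:
--                     hi = mid
--             row.insert(lo, v)
--     return e
-- ===== Notes on version B (the rewrite author's own statement) =====
-- stated objective: alternative
-- what changed: Instead of re-sorting every row with sort(reverse=True) on every iteration, B keeps each row as a descending sorted list and re-inserts the decreased head at the position found by a hand-written binary search, and computes the minimum directly over the row heads without A's 1e9+10 float sentinel.
-- outside the precondition, e.g. on jema([[2000000000]]): A returns [1000000010.0, 999999990.0], B returns [2000000000]; on jema([[1], []]): A raises IndexError, B raises IndexError; on jema([]): A does not finish within the time limit, B returns []
import Mathlib
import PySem

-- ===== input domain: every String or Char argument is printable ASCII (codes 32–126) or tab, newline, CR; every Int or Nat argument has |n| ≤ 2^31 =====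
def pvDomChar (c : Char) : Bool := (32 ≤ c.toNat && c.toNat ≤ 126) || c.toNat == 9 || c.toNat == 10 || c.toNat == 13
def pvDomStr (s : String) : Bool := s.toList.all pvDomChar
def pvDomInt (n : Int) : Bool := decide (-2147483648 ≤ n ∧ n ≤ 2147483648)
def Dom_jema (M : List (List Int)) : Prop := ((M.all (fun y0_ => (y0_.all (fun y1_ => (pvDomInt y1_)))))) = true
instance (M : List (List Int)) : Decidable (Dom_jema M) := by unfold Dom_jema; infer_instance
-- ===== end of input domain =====

-- B maintains each row as a descending sorted list and re-inserts the decreased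
-- head at a binary-searched position instead of re-sorting every row on every
-- iteration (objective: alternative). Equivalence is about the RETURN value only:
-- A sorts/modifies the rows of M in place; B leaves M untouched.

-- Termination measure shared by both loops: total sum of the nonnegative parts.
def pvRowMu (row : List Int) : Nat := (row.map Int.toNat).sum
def pvMu (rows : List (List Int)) : Nat := (rows.map pvRowMu).sum

-- sorted(row, reverse=True) — called by both Pythons (A's row.sort(reverse=True)
-- mutates in place; the sorted value is the same).
def pvSortRow (row : List Int) : List Int := PySem.List.sorted row (fun x => x) true

-- ===== PORT A =====
-- r = 1e9+10; for i in range(len(M)): r = min(r, M[i][0]); none exactly where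
-- Python raises IndexError (an empty row).  Under Pre_ the float sentinel is
-- never the minimum, so carrying it as the integer 1000000010 is exact there.
def pvMinA : List (List Int) → Int → Option Int
  | [], r => some r
  | row :: rest, r =>
    match row with
    | [] => none
    | h :: _ => pvMinA rest (min r h)

-- loop body for one row: M[i][0] -= r; M[i].sort(reverse=True)
-- (the [] case is unreachable under Pre_: Python raises IndexError there)
def pvStepA (r : Int) : List Int → List Int
  | [] => []
  | h :: t => pvSortRow ((h - r) :: t)

-- while r > 0: e.append(r); subtract r from every row head and re-sort;
-- recompute r = min(1e9+10, row[0] over rows).  The fuel argument only makes the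
-- recursion structural; jema passes pvMu rows + 1, which the loop never exhausts
-- (each iteration with r > 0 lowers pvMu by at least 1).  '(…).getD 0' only
-- totalizes the IndexError case (an empty row, excluded by Pre_): r = 0 exits.
def pvLoopA : Nat → List (List Int) → List Int
  | 0, _ => []
  | fuel + 1, rows =>
    let r := (pvMinA rows 1000000010).getD 0
    if 0 < r then r :: pvLoopA fuel (rows.map (pvStepA r)) else []

def jema (M : List (List Int)) : List Int :=
  pvLoopA (pvMu (M.map pvSortRow) + 1) (M.map pvSortRow)

-- ===== PORT B =====
-- (row[0] for row in rows); none exactly where Source B raises IndexError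
def pvHeads? : List (List Int) → Option (List Int)
  | [] => some []
  | [] :: _ => none
  | (h :: _) :: rest => (pvHeads? rest).map (h :: ·)

-- the hand-written binary search of Source B: first index in row[lo:hi) whose
-- element is < v (row is descending); (lo+hi)//2 on nonnegative ints is Nat '/',
-- and row[mid] is in range whenever hi ≤ len(row), so getD is exact there.
-- The fuel argument only makes the while-loop recursion structural; the caller
-- passes hi - lo (the interval shrinks by at least 1 per step, so it suffices).
def pvFindIdx (row : List Int) (v : Int) : Nat → Nat → Nat → Nat
  | 0, lo, _ => lo
  | fuel + 1, lo, hi =>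
    if lo < hi then
      let mid := (lo + hi) / 2
      if row.getD mid 0 ≥ v then pvFindIdx row v fuel (mid + 1) hi
      else pvFindIdx row v fuel lo mid
    else lo

-- v = row.pop(0) - r; binary search; row.insert(lo, v)  ([] unreachable under Pre_)
def pvStepB (r : Int) : List Int → List Int
  | [] => []
  | h :: t => PySem.List.insert t ((pvFindIdx t (h - r) t.length 0 t.length : Nat) : Int) (h - r)

-- while rows: r = min(row[0] for row in rows); if r <= 0: break; append, step.
-- The fuel argument only makes the recursion structural; jema_alt passes
-- pvMu rows + 1, never exhausted (each iteration lowers pvMu by at least 1).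
-- The match arm 'none => 0' only totalizes Source B's IndexError case (an empty
-- row, excluded by Pre_): r = 0 exits the loop there.
def pvLoopB : Nat → List (List Int) → List Int
  | 0, _ => []
  | fuel + 1, rows =>
    if rows = [] then []
    else
      let r := match pvHeads? rows with
               | none => (0 : Int)
               | some heads => (PySem.List.min? heads (fun x => x)).getD 0
      if 0 < r then r :: pvLoopB fuel (rows.map (pvStepB r)) else []

def jema_alt (M : List (List Int)) : List Int :=
  pvLoopB (pvMu (M.map pvSortRow) + 1) (M.map pvSortRow)

-- ===== PRECONDITION & SPEC =====
-- Pre_ excludes: M = [] (A loops forever), an empty row (A raises IndexError),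
-- and inputs whose every row maximum reaches A's float sentinel 1e9+10 (A then
-- returns a list of floats, not ints).
def Pre_jema (M : List (List Int)) : Prop :=
  M ≠ [] ∧ (∀ row ∈ M, row ≠ []) ∧ ∃ row ∈ M, ∀ x ∈ row, x < 1000000010
instance (M : List (List Int)) : Decidable (Pre_jema M) := by unfold Pre_jema; infer_instance

def pvWitness_jema : List (List Int) := [[3, 1], [2, 2]]

def Spec_jema (M : List (List Int)) (out : List Int) : Prop := out = jema_alt M
instance (M : List (List Int)) (out : List Int) : Decidable (Spec_jema M out) := by unfold Spec_jema; infer_instance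

-- ===== CLAIM (what is proved, stated in full; the proofs are below) =====
def Claim_equal_jema : Prop := ∀ (M : List (List Int)), Dom_jema M → Pre_jema M → Spec_jema M (jema M)

-- ===== LEMMAS AND PROOFS =====

-- descending order used throughout
def pvDesc (a b : Int) : Prop := b ≤ a

theorem pvStepA_perm (r : Int) (h : Int) (t : List Int) :
    (pvStepA r (h :: t)).Perm ((h - r) :: t) := by
  simpa [pvStepA, pvSortRow] using PySem.List.sorted_perm ((h - r) :: t) (fun x => x) true

theorem pvFindIdx_bounds (row : List Int) (v : Int) : ∀ (fuel lo hi : Nat), lo ≤ hi →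
    lo ≤ pvFindIdx row v fuel lo hi ∧ pvFindIdx row v fuel lo hi ≤ hi := by
  intro fuel
  induction fuel with
  | zero => intro lo hi h; simpa [pvFindIdx] using h
  | succ fuel ih =>
    intro lo hi h
    rw [pvFindIdx]
    by_cases hlt : lo < hi
    · rw [if_pos hlt]
      by_cases hge : row.getD ((lo + hi) / 2) 0 ≥ v
      · rw [if_pos hge]
        have := ih ((lo + hi) / 2 + 1) hi (by omega)
        omega
      · rw [if_neg hge]
        have := ih lo ((lo + hi) / 2) (by omega)
        omega
    · rw [if_neg hlt]; omega

theorem pvStepB_perm (r : Int) (h : Int) (t : List Int) :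
    (pvStepB r (h :: t)).Perm ((h - r) :: t) := by
  have hk := (pvFindIdx_bounds t (h - r) t.length 0 t.length (by omega)).2
  rw [pvStepB, PySem.List.insert_natCast t _ _ hk]
  exact List.perm_middle.trans (by rw [List.take_append_drop])


theorem pvFoldlMin_init (l : List Int) : ∀ (a b : Int), l.foldl min (min a b) = min a (l.foldl min b) := by
  induction l with
  | nil => intro a b; rfl
  | cons x t ih =>
    intro a b
    simp only [List.foldl_cons]
    rw [min_assoc, ih]

theorem pvMinA_eq : ∀ (rows : List (List Int)), (∀ row ∈ rows, row ≠ []) →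
    ∀ init : Int, pvMinA rows init = some ((rows.map (fun row => row.headD 0)).foldl min init) := by
  intro rows
  induction rows with
  | nil => intro _ init; simp [pvMinA]
  | cons row rest ih =>
    intro hne init
    rcases row with _ | ⟨h, t⟩
    · exact absurd rfl (hne [] (by simp))
    · simp only [pvMinA, List.map_cons, List.foldl_cons, List.headD_cons]
      exact ih (fun r hr => hne r (by simp [hr])) (min init h)

theorem pvHeads?_eq : ∀ (rows : List (List Int)), (∀ row ∈ rows, row ≠ []) →
    pvHeads? rows = some (rows.map (fun row => row.headD 0)) := by
  intro rows
  induction rows with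
  | nil => intro _; rfl
  | cons row rest ih =>
    intro hne
    rcases row with _ | ⟨h, t⟩
    · exact absurd rfl (hne [] (by simp))
    · simp only [pvHeads?, List.map_cons, List.headD_cons]
      rw [ih (fun r hr => hne r (by simp [hr]))]
      rfl

-- binary-search postcondition on a descending row
theorem pvDesc_getElem (row : List Int) (hs : row.Pairwise pvDesc) (p q : Nat)
    (hq : q < row.length) (hpq : p ≤ q) : row[q] ≤ row[p]'(by omega) := by
  rcases Nat.eq_or_lt_of_le hpq with rfl | hlt
  · exact le_refl _
  · exact List.pairwise_iff_getElem.mp hs p q (by omega) hq hlt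

theorem pvFindIdx_spec (row : List Int) (v : Int) (hs : row.Pairwise pvDesc) :
    ∀ (fuel lo hi : Nat), lo ≤ hi → hi - lo ≤ fuel → hi ≤ row.length →
    (∀ i (hi' : i < row.length), i < lo → v ≤ row[i]) →
    (∀ i (hi' : i < row.length), hi ≤ i → row[i] < v) →
    (∀ i (hi' : i < row.length), i < pvFindIdx row v fuel lo hi → v ≤ row[i]) ∧
    (∀ i (hi' : i < row.length), pvFindIdx row v fuel lo hi ≤ i → row[i] < v) := by
  have hmono := pvDesc_getElem row hs
  intro fuel
  induction fuel with
  | zero =>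
    intro lo hi hlohi hfuel hhilen hlo hhi
    have hlh : lo = hi := by omega
    subst hlh
    exact ⟨fun i hi' h => hlo i hi' h, fun i hi' h => hhi i hi' (by simpa [pvFindIdx] using h)⟩
  | succ fuel ih =>
    intro lo hi hlohi hfuel hhilen hlo hhi
    rw [pvFindIdx]
    by_cases hlt : lo < hi
    · rw [if_pos hlt]
      by_cases hge : row.getD ((lo + hi) / 2) 0 ≥ v
      · rw [if_pos hge]
        have hmidlen : (lo + hi) / 2 < row.length := by omega
        have hge' : v ≤ row[(lo + hi) / 2] := by
          have : row.getD ((lo + hi) / 2) 0 = row[(lo + hi) / 2] :=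
            List.getD_eq_getElem row 0 hmidlen
          omega
        refine ih ((lo + hi) / 2 + 1) hi (by omega) (by omega) hhilen ?_ hhi
        intro i hi' hilt
        exact le_trans hge' (hmono i ((lo + hi) / 2) hmidlen (by omega))
      · rw [if_neg hge]
        have hmidlen : (lo + hi) / 2 < row.length := by omega
        have hlt' : row[(lo + hi) / 2] < v := by
          have : row.getD ((lo + hi) / 2) 0 = row[(lo + hi) / 2] :=
            List.getD_eq_getElem row 0 hmidlen
          omega
        refine ih lo ((lo + hi) / 2) (by omega) (by omega) (by omega) hlo ?_
        intro i hi' hmidle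
        exact lt_of_le_of_lt (hmono ((lo + hi) / 2) i hi' hmidle) hlt'
    · rw [if_neg hlt]
      have hlh : lo = hi := by omega
      subst hlh
      exact ⟨fun i hi' h => hlo i hi' h, fun i hi' h => hhi i hi' h⟩
theorem pvStepB_pairwise (r h : Int) (t : List Int) (hs : t.Pairwise pvDesc) :
    (pvStepB r (h :: t)).Pairwise pvDesc := by
  set v := h - r with hv
  set k := pvFindIdx t v t.length 0 t.length with hk
  have hkb := pvFindIdx_bounds t v t.length 0 t.length (by omega)
  obtain ⟨hbefore, hafter⟩ :=
    pvFindIdx_spec t v hs t.length 0 t.length (by omega) (by omega) (le_refl _)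
      (by omega) (by omega)
  rw [pvStepB, PySem.List.insert_natCast t _ _ hkb.2]
  rw [List.pairwise_append]
  have htake : ∀ a ∈ t.take k, ∃ (i : Nat) (hi : i < t.length), i < k ∧ t[i] = a := by
    intro a ha
    obtain ⟨i, hilen, hget⟩ := List.mem_iff_getElem.mp ha
    have hik : i < k ∧ i < t.length := by simpa using (List.length_take ▸ hilen : i < (t.take k).length)
    exact ⟨i, hik.2, hik.1, by rw [← List.getElem_take]; exact hget⟩
  have hdrop : ∀ b ∈ t.drop k, ∃ (j : Nat) (hj : k + j < t.length), t[k + j] = b := by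
    intro b hb
    obtain ⟨j, hjlen, hget⟩ := List.mem_iff_getElem.mp hb
    have hjlen' : k + j < t.length := by
      have := (List.length_drop ▸ hjlen : j < t.length - k); omega
    exact ⟨j, hjlen', by rw [← hget, List.getElem_drop]⟩
  refine ⟨hs.sublist (List.take_sublist k t), ?_, ?_⟩
  · rw [List.pairwise_cons]
    refine ⟨?_, hs.sublist (List.drop_sublist k t)⟩
    intro b hb
    obtain ⟨j, hj, rfl⟩ := hdrop b hb
    exact le_of_lt (hafter (k + j) hj (by omega))
  · intro a ha b hb
    obtain ⟨i, hilen, hik, rfl⟩ := htake a ha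
    rcases List.mem_cons.mp hb with rfl | hb
    · exact hbefore i hilen hik
    · obtain ⟨j, hj, rfl⟩ := hdrop b hb
      exact pvDesc_getElem t hs i (k + j) hj (by omega)

theorem pvStep_eq (r h : Int) (t : List Int) (hs : (h :: t).Pairwise pvDesc) :
    pvStepA r (h :: t) = pvStepB r (h :: t) := by
  refine PySem.List.eq_of_perm_of_pairwise_le_of_injective (fun x => -x)
    (fun a b hab => by simpa using hab)
    ((pvStepA_perm r h t).trans (pvStepB_perm r h t).symm) ?_ ?_
  · have := PySem.List.sorted_pairwise_rev ((h - r) :: t) (fun x => x)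
    refine List.Pairwise.imp ?_ (by simpa [pvStepA, pvSortRow] using this)
    intro a b hab; simpa using hab
  · refine List.Pairwise.imp ?_ (pvStepB_pairwise r h t (List.Pairwise.sublist (by simp) hs))
    intro a b hab; simpa using hab

-- the loop invariant
def pvInv (rows : List (List Int)) : Prop :=
  rows ≠ [] ∧ (∀ row ∈ rows, row ≠ [] ∧ row.Pairwise pvDesc) ∧
    (∃ row ∈ rows, ∃ h t, row = h :: t ∧ h < 1000000010)

theorem pvLoop_eq : ∀ (fuel : Nat) (rows : List (List Int)), pvInv rows →
    pvLoopA fuel rows = pvLoopB fuel rows := by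
  intro fuel
  induction fuel with
  | zero => intro rows _; rfl
  | succ n ih =>
  intro rows hinv
  obtain ⟨hne, hrows, row₀, hrow₀, h₀, t₀, hrw₀, hlt₀⟩ := hinv
  have hnonempty : ∀ row ∈ rows, row ≠ [] := fun row h => (hrows row h).1
  -- the two ports compute the same minimum of the row heads
  rcases hheads : rows.map (fun row => row.headD 0) with _ | ⟨hh, ht⟩
  · exact absurd (List.map_eq_nil_iff.mp hheads) hne
  have hminB : PySem.List.min? (rows.map (fun row => row.headD 0)) (fun x => x)
      = some (ht.foldl min hh) := by rw [hheads]; exact PySem.List.min?_id_cons hh ht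
  have hmem_heads : ∀ row ∈ rows, row.headD 0 ∈ rows.map (fun row => row.headD 0) :=
    fun row h => List.mem_map.mpr ⟨row, h, rfl⟩
  have hminle : ∀ row ∈ rows, ht.foldl min hh ≤ row.headD 0 := by
    intro row h
    simpa using PySem.List.min?_isMin hminB _ (hmem_heads row h)
  have hmlt : ht.foldl min hh < 1000000010 := by
    have := hminle row₀ hrow₀
    rw [hrw₀] at this
    simp only [List.headD_cons] at this
    omega
  have hminA : pvMinA rows 1000000010 = some (ht.foldl min hh) := by
    rw [pvMinA_eq rows hnonempty 1000000010, hheads, List.foldl_cons,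
      pvFoldlMin_init ht 1000000010 hh]
    congr 1
    omega
  have hheadge : ∀ row ∈ rows, ∃ h t, row = h :: t ∧ ht.foldl min hh ≤ h := by
    intro row h
    rcases hrw : row with _ | ⟨rh, rt⟩
    · exact absurd hrw (hnonempty row h)
    · refine ⟨rh, rt, rfl, ?_⟩
      have := hminle row h
      rw [hrw] at this
      simpa using this
  -- unfold both loops
  simp only [pvLoopA, pvLoopB, if_neg hne, hminA, Option.getD_some,
    pvHeads?_eq rows hnonempty, hminB]
  by_cases hm0 : 0 < ht.foldl min hh
  · rw [if_pos hm0, if_pos hm0]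
    have hmapeq : rows.map (pvStepA (ht.foldl min hh)) = rows.map (pvStepB (ht.foldl min hh)) := by
      refine List.map_congr_left ?_
      intro row h
      obtain ⟨rh, rt, hrw, _⟩ := hheadge row h
      rw [hrw]
      exact pvStep_eq _ rh rt (hrw ▸ (hrows row h).2)
    congr 1
    rw [← hmapeq]
    -- the stepped rows satisfy the invariant again
    refine ih _ ⟨by simpa using hne, ?_, ?_⟩
    · intro row' hrow'
      obtain ⟨row, hrowm, rfl⟩ := List.mem_map.mp hrow'
      obtain ⟨rh, rt, hrw, _⟩ := hheadge row hrowm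
      subst hrw
      constructor
      · rw [pvStepA, pvSortRow, ne_eq, PySem.List.sorted_eq_nil_iff]
        exact List.cons_ne_nil _ _
      · have := PySem.List.sorted_pairwise_rev ((rh - ht.foldl min hh) :: rt) (fun x => x)
        exact List.Pairwise.imp (fun hab => by simpa using hab)
          (by simpa [pvStepA, pvSortRow] using this)
    · -- witness: the row whose head attained the minimum has a new head ≤ the old one
      have hmem : ht.foldl min hh ∈ rows.map (fun row => row.headD 0) := by
        have := PySem.List.min?_mem hminB
        exact this
      obtain ⟨rowm, hrowm, hheadm⟩ := List.mem_map.mp hmem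
      rcases hrwm : rowm with _ | ⟨mh, mt⟩
      · exact absurd hrwm (hnonempty rowm hrowm)
      have hmh : mh = ht.foldl min hh := by rw [hrwm] at hheadm; simpa using hheadm
      refine ⟨pvStepA (ht.foldl min hh) rowm, List.mem_map.mpr ⟨rowm, hrowm, rfl⟩, ?_⟩
      have hne' : pvStepA (ht.foldl min hh) rowm ≠ [] := by
        rw [hrwm, pvStepA, pvSortRow, ne_eq, PySem.List.sorted_eq_nil_iff]
        exact List.cons_ne_nil _ _
      rcases hsr : pvStepA (ht.foldl min hh) rowm with _ | ⟨h', t'⟩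
      · exact absurd hsr hne'
      refine ⟨h', t', rfl, ?_⟩
      have hmem' : h' ∈ pvStepA (ht.foldl min hh) rowm := by rw [hsr]; simp
      rw [hrwm, pvStepA, pvSortRow, PySem.List.mem_sorted] at hmem'
      rcases List.mem_cons.mp hmem' with rfl | hmem'
      · omega
      · -- h' is an element of the tail, hence ≤ the old head mh = the minimum
        have htail : ∀ x ∈ mt, x ≤ mh := by
          have := (hrows rowm hrowm).2
          rw [hrwm, List.pairwise_cons] at this
          exact this.1
        have := htail h' hmem'
        omega
  · rw [if_neg hm0, if_neg hm0]

theorem jema_eq_alt (M : List (List Int)) (hpre : Pre_jema M) : jema M = jema_alt M := by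
  obtain ⟨hne, hrows, row₀, hrow₀, hlt⟩ := hpre
  refine pvLoop_eq (pvMu (M.map pvSortRow) + 1) _ ⟨?_, ?_, ?_⟩
  · simpa using hne
  · intro row hrow
    obtain ⟨r, hr, rfl⟩ := List.mem_map.mp hrow
    constructor
    · rw [pvSortRow, ne_eq, PySem.List.sorted_eq_nil_iff]
      exact hrows r hr
    · have := PySem.List.sorted_pairwise_rev r (fun x => x)
      exact List.Pairwise.imp (fun hab => by simpa using hab) (by simpa [pvSortRow] using this)
  · refine ⟨pvSortRow row₀, List.mem_map.mpr ⟨row₀, hrow₀, rfl⟩, ?_⟩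
    have hne' : pvSortRow row₀ ≠ [] := by
      rw [pvSortRow, ne_eq, PySem.List.sorted_eq_nil_iff]
      exact hrows row₀ hrow₀
    rcases hsr : pvSortRow row₀ with _ | ⟨h, t⟩
    · exact absurd hsr hne'
    · refine ⟨h, t, rfl, hlt h ?_⟩
      have : h ∈ pvSortRow row₀ := by rw [hsr]; simp
      rw [pvSortRow, PySem.List.mem_sorted] at this
      exact this

-- ===== VERDICT (by name: the statement is the Claim_ definition above) =====
theorem jema_spec : Claim_equal_jema := by
  intro M _ hpre
  unfold Spec_jema
  exact jema_eq_alt M hpre
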